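-- pv_equiv track=rewrite | github.com/eliascham/Project-Gamma---Logistics | backend/app/api/v1/relationships.py | _normalize_reference
-- ===== SOURCE A (Python) =====
-- _REF_PREFIXES = ("PO-", "PO", "INV-", "INV", "BOL-", "BOL", "AWB-", "AWB", "REF-", "REF", "NO-", "NO.")
--
-- def _normalize_reference(value: str) -> str:
--     """Normalize a reference number for fuzzy matching.
--
--     Strips common prefixes, hyphens, dots, spaces, and leading zeros.
--     """
--     normalized = value.strip().upper()
--     # Strip known prefixes (longest first to avoid partial matches)
--     for prefix in sorted(_REF_PREFIXES, key=len, reverse=True):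
--         if normalized.startswith(prefix.upper()):
--             normalized = normalized[len(prefix):]
--             break
--     # Remove hyphens, dots, spaces
--     normalized = normalized.replace("-", "").replace(".", "").replace(" ", "")
--     # Strip leading zeros
--     normalized = normalized.lstrip("0") or "0"
--     return normalized
-- ===== SOURCE B (Python) =====
-- def _normalize_reference(value: str) -> str:
--     """Normalize a reference number for fuzzy matching.
--
--     Decision tree on the leading letters instead of a sorted-prefix loop,
--     and one filtering pass instead of chained replace() calls.
--     """
--     s = value.strip().upper()
--     n = 0
--     if s.startswith(("INV", "BOL", "AWB", "REF")):
--         n = 4 if s[3:4] == "-" else 3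
--     elif s.startswith(("NO-", "NO.")):
--         n = 3
--     elif s.startswith("PO"):
--         n = 3 if s[2:3] == "-" else 2
--     rest = [c for c in s[n:] if c not in "-. "]
--     i = 0
--     while i < len(rest) and rest[i] == "0":
--         i += 1
--     return "".join(rest[i:]) or "0"
-- ===== Notes on version B (the rewrite author's own statement) =====
-- stated objective: alternative
-- what changed: The sorted-prefix loop is replaced by a direct decision tree on the leading letters (one lookahead char decides dashed vs plain prefix), and the three chained replace() passes plus lstrip are replaced by a single filtering pass followed by an index scan over leading zeros.
import Mathlib
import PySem

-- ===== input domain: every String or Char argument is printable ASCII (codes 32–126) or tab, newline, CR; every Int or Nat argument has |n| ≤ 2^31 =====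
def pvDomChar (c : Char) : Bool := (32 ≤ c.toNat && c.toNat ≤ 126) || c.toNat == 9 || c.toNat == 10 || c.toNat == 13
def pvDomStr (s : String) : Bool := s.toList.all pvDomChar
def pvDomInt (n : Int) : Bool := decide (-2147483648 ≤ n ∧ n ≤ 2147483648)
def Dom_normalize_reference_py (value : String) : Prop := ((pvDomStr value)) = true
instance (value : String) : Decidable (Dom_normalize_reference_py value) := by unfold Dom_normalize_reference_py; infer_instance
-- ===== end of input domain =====

-- B replaces A's sorted-prefix loop by a decision tree on the leading letters and the
-- chained replace() passes + lstrip by a single filter pass and a leading-zero scan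
-- (alternative decomposition, same results).

-- ===== PORT A =====

-- the module constant _REF_PREFIXES (strings as their char lists)
def pvRefPrefixes : List (List Char) :=
  [['P','O','-'], ['P','O'], ['I','N','V','-'], ['I','N','V'], ['B','O','L','-'], ['B','O','L'],
   ['A','W','B','-'], ['A','W','B'], ['R','E','F','-'], ['R','E','F'], ['N','O','-'], ['N','O','.']]

-- the for-loop with break: first matching prefix is stripped, then stop
def pvStripLoopA (s : List Char) : List (List Char) → List Char
  | [] => s
  | p :: rest =>
    if PySem.Chars.startswith s (PySem.Chars.upper p) then s.drop p.length
    else pvStripLoopA s rest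

-- Python s.lstrip("0") for the single-char set "0": drop leading '0's (hand port, exact)
def pvLstripZeroA (s : List Char) : List Char := s.dropWhile (fun c => c == '0')

def normalize_reference_py (value : String) : String :=
  let normalized := PySem.Chars.upper (PySem.Chars.strip value.toList)
  let normalized := pvStripLoopA normalized
      (PySem.List.sorted pvRefPrefixes (fun p => p.length) (reverse := true))
  let normalized :=
    PySem.Chars.replace (PySem.Chars.replace (PySem.Chars.replace normalized
      ['-'] []) ['.'] []) [' '] []
  let stripped := pvLstripZeroA normalized
  String.ofList (if stripped.isEmpty then ['0'] else stripped)

-- ===== PORT B =====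

-- the while loop 'i += 1 over leading zeros' fused with rest[i:]
def pvSkipZerosB : List Char → List Char
  | [] => []
  | c :: t => if c == '0' then pvSkipZerosB t else c :: t

def normalize_reference_py_alt (value : String) : String :=
  let s := PySem.Chars.upper (PySem.Chars.strip value.toList)
  let n : Nat :=
    if PySem.Chars.startswith s ['I','N','V'] || PySem.Chars.startswith s ['B','O','L'] ||
       PySem.Chars.startswith s ['A','W','B'] || PySem.Chars.startswith s ['R','E','F'] then
      (if PySem.Chars.slice s (some 3) (some 4) == ['-'] then 4 else 3)
    else if PySem.Chars.startswith s ['N','O','-'] || PySem.Chars.startswith s ['N','O','.'] then 3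
    else if PySem.Chars.startswith s ['P','O'] then
      (if PySem.Chars.slice s (some 2) (some 3) == ['-'] then 3 else 2)
    else 0
  let rest := (s.drop n).filter (fun c => !(c == '-' || c == '.' || c == ' '))
  let out := pvSkipZerosB rest
  String.ofList (if out.isEmpty then ['0'] else out)

-- ===== PRECONDITION & SPEC =====
def Spec_normalize_reference_py (value : String) (out : String) : Prop := out = normalize_reference_py_alt value
instance (value : String) (out : String) : Decidable (Spec_normalize_reference_py value out) := by unfold Spec_normalize_reference_py; infer_instance

-- ===== CLAIM (what is proved, stated in full; the proofs are below) =====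
def Claim_equal_normalize_reference_py : Prop := ∀ (value : String), Dom_normalize_reference_py value → Spec_normalize_reference_py value (normalize_reference_py value)

-- ===== LEMMAS AND PROOFS =====

theorem pv_sorted_eq :
    PySem.List.sorted pvRefPrefixes (fun p => p.length) (reverse := true) =
    [['I','N','V','-'], ['B','O','L','-'], ['A','W','B','-'], ['R','E','F','-'],
     ['P','O','-'], ['I','N','V'], ['B','O','L'], ['A','W','B'], ['R','E','F'],
     ['N','O','-'], ['N','O','.'], ['P','O']] := by decide

theorem pv_loop_unfold (s : List Char) :
    pvStripLoopA s (PySem.List.sorted pvRefPrefixes (fun p => p.length) (reverse := true)) =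
    if PySem.Chars.startswith s ['I','N','V','-'] then s.drop 4
    else if PySem.Chars.startswith s ['B','O','L','-'] then s.drop 4
    else if PySem.Chars.startswith s ['A','W','B','-'] then s.drop 4
    else if PySem.Chars.startswith s ['R','E','F','-'] then s.drop 4
    else if PySem.Chars.startswith s ['P','O','-'] then s.drop 3
    else if PySem.Chars.startswith s ['I','N','V'] then s.drop 3
    else if PySem.Chars.startswith s ['B','O','L'] then s.drop 3
    else if PySem.Chars.startswith s ['A','W','B'] then s.drop 3
    else if PySem.Chars.startswith s ['R','E','F'] then s.drop 3
    else if PySem.Chars.startswith s ['N','O','-'] then s.drop 3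
    else if PySem.Chars.startswith s ['N','O','.'] then s.drop 3
    else if PySem.Chars.startswith s ['P','O'] then s.drop 2
    else s := by
  rw [pv_sorted_eq]
  simp only [pvStripLoopA, show PySem.Chars.upper ['I','N','V','-'] = ['I','N','V','-'] from by decide,
    show PySem.Chars.upper ['B','O','L','-'] = ['B','O','L','-'] from by decide,
    show PySem.Chars.upper ['A','W','B','-'] = ['A','W','B','-'] from by decide,
    show PySem.Chars.upper ['R','E','F','-'] = ['R','E','F','-'] from by decide,
    show PySem.Chars.upper ['P','O','-'] = ['P','O','-'] from by decide,
    show PySem.Chars.upper ['I','N','V'] = ['I','N','V'] from by decide,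
    show PySem.Chars.upper ['B','O','L'] = ['B','O','L'] from by decide,
    show PySem.Chars.upper ['A','W','B'] = ['A','W','B'] from by decide,
    show PySem.Chars.upper ['R','E','F'] = ['R','E','F'] from by decide,
    show PySem.Chars.upper ['N','O','-'] = ['N','O','-'] from by decide,
    show PySem.Chars.upper ['N','O','.'] = ['N','O','.'] from by decide,
    show PySem.Chars.upper ['P','O'] = ['P','O'] from by decide,
    List.length_cons, List.length_nil]

-- (p ++ [c]) is a prefix of s iff p is and the next char is c
theorem pv_isPrefixOf_snoc (c : Char) : ∀ (p s : List Char),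
    (p ++ [c]).isPrefixOf s = (p.isPrefixOf s && (s[p.length]? == some c))
  | [], [] => by simp [List.isPrefixOf]
  | [], d :: t => by simp [List.isPrefixOf, eq_comm]
  | _ :: _, [] => by simp [List.isPrefixOf]
  | a :: p, d :: t => by
    simp only [List.cons_append, List.isPrefixOf, List.length_cons, List.getElem?_cons_succ,
      pv_isPrefixOf_snoc c p t, Bool.and_assoc, Bool.beq_comm]

theorem pv_sw_snoc (s p : List Char) (c : Char) :
    PySem.Chars.startswith s (p ++ [c]) = (PySem.Chars.startswith s p && (s[p.length]? == some c)) := by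
  simp only [PySem.Chars.startswith, pv_isPrefixOf_snoc]

theorem pv_sw_head {s : List Char} {c : Char} {p : List Char}
    (h : PySem.Chars.startswith s (c :: p) = true) : s[0]? = some c := by
  rw [PySem.Chars.startswith_iff] at h
  rcases h with ⟨t, rfl⟩
  simp

theorem pv_sw_ne {s : List Char} {c : Char} {p : List Char}
    (h : PySem.Chars.startswith s (c :: p) = true) (d : Char) (q : List Char) (hne : d ≠ c) :
    PySem.Chars.startswith s (d :: q) = false := by
  by_contra hx
  rw [Bool.not_eq_false] at hx
  exact hne (Option.some_injective _ ((pv_sw_head hx).symm.trans (pv_sw_head h)))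

-- s[k:k+1] as an option lookup
theorem pv_slice_one (s : List Char) (a b : Int) (ha : 0 ≤ a) (hb : b = a + 1) (c : Char) :
    (PySem.Chars.slice s (some a) (some b) == [c]) = (s[a.toNat]? == some c) := by
  subst hb
  rw [PySem.Chars.slice, PySem.List.slice_toNat _ ha (by omega)]
  have h1 : (a + 1).toNat - a.toNat = 1 := by omega
  rw [h1]
  rcases hd : (s.drop a.toNat) with _ | ⟨x, t⟩
  · have hn : s[a.toNat]? = none := by
      have hl := congrArg List.length hd
      simp at hl
      exact List.getElem?_eq_none (by omega)
    simp [hd, hn]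
  · have hs : s[a.toNat]? = some x := by
      have h0 := List.getElem?_drop (xs := s) (i := a.toNat) (j := 0)
      rw [hd] at h0
      simpa using h0.symm
    simp [hd, hs]

-- A's prefix loop computes the same drop count as B's decision tree
theorem pv_strip_eq (s : List Char) :
    pvStripLoopA s (PySem.List.sorted pvRefPrefixes (fun p => p.length) (reverse := true)) =
    s.drop
      (if PySem.Chars.startswith s ['I','N','V'] || PySem.Chars.startswith s ['B','O','L'] ||
          PySem.Chars.startswith s ['A','W','B'] || PySem.Chars.startswith s ['R','E','F'] then
        (if PySem.Chars.slice s (some 3) (some 4) == ['-'] then 4 else 3)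
      else if PySem.Chars.startswith s ['N','O','-'] || PySem.Chars.startswith s ['N','O','.'] then 3
      else if PySem.Chars.startswith s ['P','O'] then
        (if PySem.Chars.slice s (some 2) (some 3) == ['-'] then 3 else 2)
      else 0) := by
  rw [pv_loop_unfold]
  rw [show (['I','N','V','-'] : List Char) = ['I','N','V'] ++ ['-'] from rfl,
      show (['B','O','L','-'] : List Char) = ['B','O','L'] ++ ['-'] from rfl,
      show (['A','W','B','-'] : List Char) = ['A','W','B'] ++ ['-'] from rfl,
      show (['R','E','F','-'] : List Char) = ['R','E','F'] ++ ['-'] from rfl,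
      show (['P','O','-'] : List Char) = ['P','O'] ++ ['-'] from rfl]
  rw [pv_sw_snoc s ['I','N','V'] '-', pv_sw_snoc s ['B','O','L'] '-',
      pv_sw_snoc s ['A','W','B'] '-', pv_sw_snoc s ['R','E','F'] '-',
      pv_sw_snoc s ['P','O'] '-']
  rw [pv_slice_one s 3 4 (by norm_num) (by norm_num) '-',
      pv_slice_one s 2 3 (by norm_num) (by norm_num) '-']
  norm_num
  by_cases hI : PySem.Chars.startswith s ['I','N','V'] = true
  · simp [hI, pv_sw_ne hI 'B' _ (by decide), pv_sw_ne hI 'A' _ (by decide),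
      pv_sw_ne hI 'R' _ (by decide), pv_sw_ne hI 'P' _ (by decide),
      pv_sw_ne hI 'N' _ (by decide)]; split <;> rfl
  · by_cases hB : PySem.Chars.startswith s ['B','O','L'] = true
    · simp [hI, hB, pv_sw_ne hB 'I' _ (by decide), pv_sw_ne hB 'A' _ (by decide),
        pv_sw_ne hB 'R' _ (by decide), pv_sw_ne hB 'P' _ (by decide),
        pv_sw_ne hB 'N' _ (by decide)]; split <;> rfl
    · by_cases hA : PySem.Chars.startswith s ['A','W','B'] = true
      · simp [hI, hB, hA, pv_sw_ne hA 'I' _ (by decide), pv_sw_ne hA 'B' _ (by decide),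
          pv_sw_ne hA 'R' _ (by decide), pv_sw_ne hA 'P' _ (by decide),
          pv_sw_ne hA 'N' _ (by decide)]; split <;> rfl
      · by_cases hR : PySem.Chars.startswith s ['R','E','F'] = true
        · simp [hI, hB, hA, hR, pv_sw_ne hR 'I' _ (by decide), pv_sw_ne hR 'B' _ (by decide),
            pv_sw_ne hR 'A' _ (by decide), pv_sw_ne hR 'P' _ (by decide),
            pv_sw_ne hR 'N' _ (by decide)]; split <;> rfl
        · by_cases hN1 : PySem.Chars.startswith s ['N','O','-'] = true
          · simp [hI, hB, hA, hR, hN1, pv_sw_ne hN1 'I' _ (by decide), pv_sw_ne hN1 'B' _ (by decide),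
              pv_sw_ne hN1 'A' _ (by decide), pv_sw_ne hN1 'R' _ (by decide),
              pv_sw_ne hN1 'P' _ (by decide)]
          · by_cases hN2 : PySem.Chars.startswith s ['N','O','.'] = true
            · simp [hI, hB, hA, hR, hN1, hN2, pv_sw_ne hN2 'I' _ (by decide), pv_sw_ne hN2 'B' _ (by decide),
                pv_sw_ne hN2 'A' _ (by decide), pv_sw_ne hN2 'R' _ (by decide),
                pv_sw_ne hN2 'P' _ (by decide)]
            · by_cases hP : PySem.Chars.startswith s ['P','O'] = true
              · simp [hI, hB, hA, hR, hN1, hN2, hP]; split <;> rfl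
              · simp [hI, hB, hA, hR, hN1, hN2, hP]

-- str.replace(c, "") is a filter
theorem pv_replace_go (c : Char) : ∀ (fuel : Nat) (l acc : List Char), l.length ≤ fuel →
    PySem.Chars.replace.go [c] [] fuel l acc = acc.reverse ++ l.filter (fun x => !(x == c))
  | 0, [], acc, _ => by simp [PySem.Chars.replace.go]
  | 0, x :: t, acc, h => by simp at h
  | fuel + 1, [], acc, _ => by simp [PySem.Chars.replace.go]
  | fuel + 1, x :: t, acc, h => by
    rw [PySem.Chars.replace.go]
    simp only [List.isPrefixOf, List.isPrefixOf_nil_left, Bool.and_true, List.length_cons,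
      List.drop_succ_cons, List.drop_zero, List.length_nil, List.reverse_nil, List.nil_append]
    cases hb : (c == x) with
    | true =>
      have hxb : (x == c) = true := by
        have : c = x := by simpa using hb
        simp [this]
      rw [if_pos rfl, pv_replace_go c fuel t acc (by simpa using h)]
      simp [hxb]
    | false =>
      have hxb : (x == c) = false := by
        have : ¬ c = x := by simpa using hb
        simpa using Ne.symm this
      rw [if_neg (by simp), pv_replace_go c fuel t (x :: acc) (by simpa using h)]
      simp [hxb]

theorem pv_replace_single (c : Char) (l : List Char) :
    PySem.Chars.replace l [c] [] = l.filter (fun x => !(x == c)) := by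
  rw [PySem.Chars.replace]
  simp only [List.isEmpty_cons, if_false, Bool.false_eq_true]
  simpa using pv_replace_go c l.length l [] le_rfl

theorem pv_replace_chain (l : List Char) :
    PySem.Chars.replace (PySem.Chars.replace (PySem.Chars.replace l ['-'] []) ['.'] []) [' '] [] =
    l.filter (fun c => !(c == '-' || c == '.' || c == ' ')) := by
  simp only [pv_replace_single, List.filter_filter]
  apply List.filter_congr
  intro x _
  cases hx1 : x == '-' <;> cases hx2 : x == '.' <;> cases hx3 : x == ' ' <;> simp [hx1, hx2, hx3]

theorem pv_skip_eq (l : List Char) : pvSkipZerosB l = pvLstripZeroA l := by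
  induction l with
  | nil => rfl
  | cons c t ih =>
    rw [pvSkipZerosB, pvLstripZeroA, List.dropWhile]
    cases h : (c == '0') <;> simp [h, ih, pvLstripZeroA]


theorem pv_core (value : String) : normalize_reference_py value = normalize_reference_py_alt value := by
  simp only [normalize_reference_py, normalize_reference_py_alt, pv_strip_eq, pv_replace_chain,
    pv_skip_eq]

-- ===== VERDICT (by name: the statement is the Claim_ definition above) =====
theorem normalize_reference_py_spec : Claim_equal_normalize_reference_py := by
  intro value _
  unfold Spec_normalize_reference_py
  exact pv_core value
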